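-- pv_equiv track=rewrite | github.com/SerhiiBerehovyi/coma | 1. Semester/pa12/co1_pa12.py | maxunimod
-- ===== SOURCE A (Python) =====
-- def maxunimod(L):
-- 	"""
-- 		function finds max len of all unimodular
-- 		sequences of numbers
--
-- 		uses unimod function to find next
-- 		unimodular sequence and saves len
-- 		of it in unimods[]. returns max(unimods)
--
-- 		@input: sequence of numbers L
-- 		@output: len of sequence with max len
--
-- 	"""
-- 	if len(L) <= 1:
-- 		return len(L)
-- 	unimods = []
-- 	start = i = 0	# start and end of unimodular sequence
-- 	while i < len(L):
-- 		i = unimod(L,i)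
-- 		unimods.append(len(L[start:i]))
-- 		if i != len(L):
-- 		 	i = if_repeat(L,i)
-- 		start = i - 1	# refresh start for next itaration
-- 	return max(unimods)
--
-- def unimod(L, start):
-- 	"""
-- 		help-function used to find index of last element
-- 		in unimodular sequence
-- 			( a_1 <= a_2 <= *** <= a_i >= a_i+1 >= *** >= a_d )
--
-- 		@input: sequence of numbers L
-- 		@output: index of last elemet in sequence
-- 	"""
-- 	i = start + 1
-- 	# find  ( a_1 <= a_2 <= *** <= a_i ) part
-- 	while i < len(L) and L[i] >= L[i-1]:
-- 		i += 1
-- 	# find ( a_i+1 >= *** >= a_d ) part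
-- 	while i < len(L) and L[i] <= L[i-1]:
-- 		i += 1
-- 	return i
--
-- def if_repeat(L, i):
-- 	# if a_d == a_d-1 == *** == a_x
-- 	# we must to find a_x
-- 	while i > 0 and L[i-1] == L[i-2]:
-- 		i -= 1
-- 	return i
-- ===== SOURCE B (Python) =====
-- def maxunimod(L):
--     # One-pass scan: track `up` = length of the longest non-decreasing run
--     # ending at i, `m` = length of the longest unimodular run ending at i,
--     # `best` = max of m so far.  (A instead enumerates maximal unimodular
--     # segments with a helper scanner and plateau backtracking.)
--     n = len(L)
--     if n <= 1:
--         return n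
--     best = up = m = 1
--     for i in range(1, n):
--         if L[i] > L[i-1]:
--             up += 1
--             m = up
--         elif L[i] == L[i-1]:
--             up += 1
--             m += 1
--         else:
--             up = 1
--             m += 1
--         if m > best:
--             best = m
--     return best
-- ===== Notes on version B (the rewrite author's own statement) =====
-- stated objective: faster
-- what changed: Replaced A's segment enumerator (repeated unimod scans with if_repeat plateau backtracking, list slicing and a final max over collected segment lengths) by a single left-to-right pass keeping three counters: longest non-decreasing run ending here, longest unimodular run ending here, and the running maximum.
import Mathlib
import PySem

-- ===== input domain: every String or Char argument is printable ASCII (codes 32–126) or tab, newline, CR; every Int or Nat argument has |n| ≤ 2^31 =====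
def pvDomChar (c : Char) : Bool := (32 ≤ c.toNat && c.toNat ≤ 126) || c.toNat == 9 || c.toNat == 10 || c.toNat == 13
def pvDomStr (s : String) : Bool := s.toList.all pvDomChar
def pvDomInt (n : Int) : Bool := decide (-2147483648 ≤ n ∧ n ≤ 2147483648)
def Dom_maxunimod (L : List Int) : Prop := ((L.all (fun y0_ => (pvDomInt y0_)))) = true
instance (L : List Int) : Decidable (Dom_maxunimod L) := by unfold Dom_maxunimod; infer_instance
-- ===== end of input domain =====

-- B replaces A's segment enumerator (unimod rescans + if_repeat plateau backtracking + list of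
-- segment lengths) by a single pass with three counters; measurably faster by a constant factor
-- (no slicing, no list of lengths, no rescans).

-- ===== PORT A =====

-- while i < len(L) and L[i] >= L[i-1]: i += 1     (first loop of unimod)
def unimodUp (L : List Int) (i : Nat) : Nat :=
  if _h : i < L.length ∧ L.getD (i-1) 0 ≤ L.getD i 0 then unimodUp L (i+1) else i
termination_by L.length - i
decreasing_by omega

-- while i < len(L) and L[i] <= L[i-1]: i += 1     (second loop of unimod)
def unimodDown (L : List Int) (i : Nat) : Nat :=
  if _h : i < L.length ∧ L.getD i 0 ≤ L.getD (i-1) 0 then unimodDown L (i+1) else i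
termination_by L.length - i
decreasing_by omega

def unimodP (L : List Int) (start : Nat) : Nat := unimodDown L (unimodUp L (start+1))

-- while i > 0 and L[i-1] == L[i-2]: i -= 1
-- L[i-1]/L[i-2] via pyGetD: for the reachable states (2 ≤ len L, 1 ≤ i ≤ len L) both indices are
-- in Python's range (i-2 = -1 wraps to the last element), so the default 0 is never returned.
def ifRepeat (L : List Int) (i : Nat) : Nat :=
  if _h : 0 < i ∧ PySem.List.pyGetD L ((i:Int)-1) 0 = PySem.List.pyGetD L ((i:Int)-2) 0
  then ifRepeat L (i-1) else i
termination_by i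
decreasing_by omega

-- lemmas cited by aloop's decreasing_by (the loop variable strictly increases per iteration)
lemma pv_le_unimodUp (L : List Int) (i : Nat) : i ≤ unimodUp L i := by
  fun_induction unimodUp L i with
  | case1 i h ih => omega
  | case2 i h => omega

lemma pv_unimodUp_exit (L : List Int) (i : Nat) (h : unimodUp L i < L.length) :
    L.getD (unimodUp L i) 0 < L.getD (unimodUp L i - 1) 0 := by
  fun_induction unimodUp L i with
  | case1 i h' ih => exact ih h
  | case2 i h' => push Not at h'; exact h' h

lemma pv_le_unimodDown (L : List Int) (i : Nat) : i ≤ unimodDown L i := by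
  fun_induction unimodDown L i with
  | case1 i h ih => omega
  | case2 i h => omega

lemma pv_ifRepeat_pairs (L : List Int) (i : Nat) :
    ∀ k, ifRepeat L i < k → k ≤ i →
      PySem.List.pyGetD L ((k:Int)-1) 0 = PySem.List.pyGetD L ((k:Int)-2) 0 := by
  fun_induction ifRepeat L i with
  | case1 i h ih =>
    intro k hk1 hk2
    rcases Nat.lt_or_ge (i-1) k with h' | h'
    · have : k = i := by omega
      subst this; exact h.2
    · exact ih k hk1 h'
  | case2 i h => intro k hk1 hk2; omega

-- if unimod stopped strictly below q's drop … : the plateau cannot reach back past a strict drop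
lemma pv_plateau_bound (L : List Int) (q j : Nat) (h1 : 1 ≤ q) (h2 : q < j)
    (hdrop : L.getD q 0 < L.getD (q-1) 0) : q < ifRepeat L j := by
  by_contra hle
  push Not at hle
  have hpair := pv_ifRepeat_pairs L j (q+1) (by omega) (by omega)
  have e1 : ((q+1 : Nat) : Int) - 1 = ((q : Nat) : Int) := by push_cast; ring
  have e2 : ((q+1 : Nat) : Int) - 2 = ((q-1 : Nat) : Int) := by omega
  rw [e1, e2, PySem.List.pyGetD_natCast, PySem.List.pyGetD_natCast] at hpair
  omega

lemma pv_unimodDown_step (L : List Int) (i : Nat)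
    (h : i < L.length ∧ L.getD i 0 ≤ L.getD (i-1) 0) :
    unimodDown L i = unimodDown L (i+1) := by
  rw [unimodDown, dif_pos h]

lemma pv_unimodUp_le (L : List Int) (i : Nat) (h : i ≤ L.length) : unimodUp L i ≤ L.length := by
  fun_induction unimodUp L i with
  | case1 i h' ih => exact ih (by omega)
  | case2 i h' => exact h

-- progress of A's outer loop: i = if_repeat(L, unimod(L, i)) strictly increases
lemma pv_progress (L : List Int) (i : Nat) (hi : i < L.length)
    (hj : unimodP L i ≠ L.length) : i < ifRepeat L (unimodP L i) := by
  have hq1 : i + 1 ≤ unimodUp L (i+1) := pv_le_unimodUp L (i+1)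
  have hqle : unimodUp L (i+1) ≤ L.length := pv_unimodUp_le L (i+1) (by omega)
  set q := unimodUp L (i+1) with hqdef
  have hqn : q < L.length := by
    rcases Nat.lt_or_ge q L.length with h | h
    · exact h
    · exfalso
      have hq : q = L.length := by omega
      have hdq : unimodDown L q = q := by rw [unimodDown, dif_neg (by rintro ⟨h1, -⟩; omega)]
      have : unimodP L i = L.length := by rw [unimodP, ← hqdef, hdq, hq]
      exact hj this
  have hdrop := pv_unimodUp_exit L (i+1) hqn
  have hstep := pv_unimodDown_step L q ⟨hqn, le_of_lt hdrop⟩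
  have hjq : q < unimodP L i := by
    have := pv_le_unimodDown L (q+1)
    rw [unimodP, ← hqdef, hstep]; omega
  have := pv_plateau_bound L q (unimodP L i) (by omega) hjq hdrop
  omega

-- the outer while loop of maxunimod; start is a Python int, acc the list `unimods`
def aloop (L : List Int) (start : Int) (i : Nat) (acc : List Int) : List Int :=
  if hi : i < L.length then
    let j := unimodP L i
    let acc' := acc ++ [((PySem.List.slice L (some start) (some (j:Int))).length : Int)]
    let i2 := if j = L.length then j else ifRepeat L j
    aloop L ((i2:Int)-1) i2 acc'
  else acc
termination_by L.length + 1 - i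
decreasing_by
  have h : i < L.length := hi
  by_cases hj : unimodP L i = L.length
  · simp [hj]; omega
  · have h1 := pv_progress L i h hj
    simp [hj]; omega

def maxunimod (L : List Int) : Int :=
  if L.length ≤ 1 then (L.length : Int)
  else
    -- max(unimods): the list is provably nonempty here (the loop body runs at least once),
    -- so the `.getD 0` default is never returned
    (PySem.List.max? (aloop L 0 0 []) (fun x => x)).getD 0

-- ===== PORT B =====
def maxunimod_alt (L : List Int) : Int :=
  if L.length ≤ 1 then (L.length : Int)
  else
    -- state (best, up, m); one pass over i = 1 .. n-1
    ((PySem.List.pyRange 1 (L.length : Int) 1).foldl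
      (fun s i =>
        let best := s.1
        let up := s.2.1
        let m := s.2.2
        let um : Int × Int :=
          if PySem.List.pyGetD L (i-1) 0 < PySem.List.pyGetD L i 0 then (up+1, up+1)
          else if PySem.List.pyGetD L i 0 = PySem.List.pyGetD L (i-1) 0 then (up+1, m+1)
          else (1, m+1)
        (if best < um.2 then um.2 else best, um.1, um.2))
      (1, 1, 1)).1

-- ===== PRECONDITION & SPEC =====
def Spec_maxunimod (L : List Int) (out : Int) : Prop := out = maxunimod_alt L
instance (L : List Int) (out : Int) : Decidable (Spec_maxunimod L out) := by unfold Spec_maxunimod; infer_instance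

-- ===== CLAIM (what is proved, stated in full; the proofs are below) =====
def Claim_equal_maxunimod : Prop := ∀ (L : List Int), Dom_maxunimod L → Spec_maxunimod L (maxunimod L)

-- ===== LEMMAS AND PROOFS =====

lemma pv_unimodDown_le (L : List Int) (i : Nat) (h : i ≤ L.length) : unimodDown L i ≤ L.length := by
  fun_induction unimodDown L i with
  | case1 i h' ih => exact ih (by omega)
  | case2 i h' => exact h


lemma pv_ifRepeat_le (L : List Int) (i : Nat) : ifRepeat L i ≤ i := by
  fun_induction ifRepeat L i with
  | case1 i h ih => omega
  | case2 i h => omega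


-- ---- proof-side quantities: up k = longest non-decreasing run ending at k,
-- ---- m k = longest unimodular run ending at k, best k = max of m over 0..k
def pvUp (L : List Int) : Nat → Int
  | 0 => 1
  | k+1 => if L.getD k 0 ≤ L.getD (k+1) 0 then pvUp L k + 1 else 1

def pvM (L : List Int) : Nat → Int
  | 0 => 1
  | k+1 => if L.getD k 0 < L.getD (k+1) 0 then pvUp L k + 1 else pvM L k + 1

def pvBest (L : List Int) : Nat → Int
  | 0 => 1
  | k+1 => max (pvBest L k) (pvM L (k+1))

-- ---- B-side characterisation ----
lemma pvB_fold (L : List Int) (e : Nat) :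
    ((PySem.List.pyRange 1 ((e:Int)+1) 1).foldl
      (fun s i =>
        let best := s.1
        let up := s.2.1
        let m := s.2.2
        let um : Int × Int :=
          if PySem.List.pyGetD L (i-1) 0 < PySem.List.pyGetD L i 0 then (up+1, up+1)
          else if PySem.List.pyGetD L i 0 = PySem.List.pyGetD L (i-1) 0 then (up+1, m+1)
          else (1, m+1)
        (if best < um.2 then um.2 else best, um.1, um.2))
      ((1:Int), (1:Int), (1:Int))) = (pvBest L e, pvUp L e, pvM L e) := by
  induction e with
  | zero =>
    rw [show ((0:Nat):Int)+1 = 1 by norm_num, PySem.List.pyRange_one_eq_nil (by omega)]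
    rfl
  | succ e ih =>
    have hcast : (((e+1:Nat)):Int)+1 = ((e:Int)+1)+1 := by push_cast; ring
    rw [hcast, PySem.List.pyRange_one_succ_right (by omega), List.foldl_append, ih]
    simp only [List.foldl_cons, List.foldl_nil]
    have e1 : ((e:Int)+1-1) = ((e:Nat):Int) := by ring
    have e2 : ((e:Int)+1) = (((e+1:Nat)):Int) := by push_cast; ring
    rw [e1, e2, PySem.List.pyGetD_natCast, PySem.List.pyGetD_natCast]
    by_cases h1 : L.getD e 0 < L.getD (e+1) 0
    · simp only [if_pos h1]
      have hle : L.getD e 0 ≤ L.getD (e+1) 0 := le_of_lt h1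
      simp only [pvBest, pvUp, pvM, if_pos h1, if_pos hle]
      rw [show (if pvBest L e < pvUp L e + 1 then pvUp L e + 1 else pvBest L e)
            = max (pvBest L e) (pvUp L e + 1) from (max_def_lt _ _).symm]
    · by_cases h2 : L.getD (e+1) 0 = L.getD e 0
      · simp only [if_neg h1, if_pos h2]
        have hle : L.getD e 0 ≤ L.getD (e+1) 0 := le_of_eq h2.symm
        simp only [pvBest, pvUp, pvM, if_neg h1, if_pos hle]
        rw [show (if pvBest L e < pvM L e + 1 then pvM L e + 1 else pvBest L e)
              = max (pvBest L e) (pvM L e + 1) from (max_def_lt _ _).symm]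
      · simp only [if_neg h1, if_neg h2]
        have hle : ¬ (L.getD e 0 ≤ L.getD (e+1) 0) := by
          rcases lt_trichotomy (L.getD e 0) (L.getD (e+1) 0) with h | h | h
          · exact absurd h h1
          · exact absurd h.symm h2
          · omega
        simp only [pvBest, pvUp, pvM, if_neg h1, if_neg hle]
        rw [show (if pvBest L e < pvM L e + 1 then pvM L e + 1 else pvBest L e)
              = max (pvBest L e) (pvM L e + 1) from (max_def_lt _ _).symm]

lemma pvB_char (L : List Int) (hn : 2 ≤ L.length) :
    maxunimod_alt L = pvBest L (L.length - 1) := by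
  rw [maxunimod_alt, if_neg (by omega)]
  have hcast : ((L.length:Nat):Int) = ((L.length - 1 : Nat):Int) + 1 := by omega
  rw [hcast, pvB_fold L (L.length - 1)]

-- ---- A-side scanner facts ----
lemma pv_up_pairs (L : List Int) (i : Nat) :
    ∀ k, i ≤ k → k < unimodUp L i → L.getD (k-1) 0 ≤ L.getD k 0 := by
  fun_induction unimodUp L i with
  | case1 i h ih =>
    intro k hk1 hk2
    rcases Nat.eq_or_lt_of_le hk1 with rfl | h'
    · exact h.2
    · exact ih k h' hk2
  | case2 i h =>
    intro k hk1 hk2; omega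

lemma pv_down_pairs (L : List Int) (i : Nat) :
    ∀ k, i ≤ k → k < unimodDown L i → L.getD k 0 ≤ L.getD (k-1) 0 := by
  fun_induction unimodDown L i with
  | case1 i h ih =>
    intro k hk1 hk2
    rcases Nat.eq_or_lt_of_le hk1 with rfl | h'
    · exact h.2
    · exact ih k h' hk2
  | case2 i h =>
    intro k hk1 hk2; omega

lemma pv_unimodDown_exit (L : List Int) (i : Nat) (h : unimodDown L i < L.length) :
    L.getD (unimodDown L i - 1) 0 < L.getD (unimodDown L i) 0 := by
  fun_induction unimodDown L i with
  | case1 i h' ih => exact ih h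
  | case2 i h' => push Not at h'; exact h' h

lemma pv_ifRepeat_stop (L : List Int) (i : Nat) (h : 0 < ifRepeat L i) :
    PySem.List.pyGetD L ((ifRepeat L i : Int)-1) 0 ≠ PySem.List.pyGetD L ((ifRepeat L i : Int)-2) 0 := by
  fun_induction ifRepeat L i with
  | case1 i h' ih => exact ih h
  | case2 i h' => push Not at h'; exact h' h

-- adjacent equality inside the plateau skipped back over by if_repeat
lemma pv_plateau_adj (L : List Int) (j : Nat) :
    ∀ k, ifRepeat L j ≤ k → 1 ≤ k → k + 1 ≤ j → L.getD k 0 = L.getD (k-1) 0 := by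
  intro k h1 h2 h3
  have hpair := pv_ifRepeat_pairs L j (k+1) (by omega) h3
  have e1 : ((k+1 : Nat) : Int) - 1 = ((k : Nat) : Int) := by push_cast; ring
  have e2 : ((k+1 : Nat) : Int) - 2 = ((k-1 : Nat) : Int) := by omega
  rw [e1, e2, PySem.List.pyGetD_natCast, PySem.List.pyGetD_natCast] at hpair
  exact hpair

-- ---- interval recurrences for pvUp / pvM / pvBest ----
lemma pv_up_run (L : List Int) (s : Nat)
    (hleft : s = 0 ∨ L.getD s 0 < L.getD (s-1) 0) :
    ∀ k, s ≤ k → (∀ t, s+1 ≤ t → t ≤ k → L.getD (t-1) 0 ≤ L.getD t 0) →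
      pvUp L k = (k:Int) - (s:Int) + 1 := by
  intro k
  induction k with
  | zero =>
    intro hk _; interval_cases s
    simp [pvUp]
  | succ k ih =>
    intro hk hp
    rcases Nat.eq_or_lt_of_le hk with rfl | h'
    · rcases hleft with h0 | hlt
      · omega
      · have hlt' : L.getD (k+1) 0 < L.getD k 0 := by simpa using hlt
        have hc : ¬ (L.getD k 0 ≤ L.getD (k+1) 0) := by omega
        simp only [pvUp, if_neg hc]
        push_cast; ring
    · have hpair : L.getD k 0 ≤ L.getD (k+1) 0 := hp (k+1) (by omega) (le_refl _)
      simp only [pvUp, if_pos hpair]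
      rw [ih (by omega) (fun t ht1 ht2 => hp t ht1 (by omega))]
      push_cast; ring

lemma pv_m_eq_up (L : List Int) (E : Nat) (hmE : pvM L E = pvUp L E) :
    ∀ k, E ≤ k → (∀ t, E+1 ≤ t → t ≤ k → L.getD (t-1) 0 ≤ L.getD t 0) →
      pvM L k = pvUp L k := by
  intro k
  induction k with
  | zero => intro hk _; interval_cases E; exact hmE
  | succ k ih =>
    intro hk hp
    rcases Nat.eq_or_lt_of_le hk with rfl | h'
    · exact hmE
    · have hpair : L.getD k 0 ≤ L.getD (k+1) 0 := hp (k+1) (by omega) (le_refl _)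
      have ihk := ih (by omega) (fun t ht1 ht2 => hp t ht1 (by omega))
      by_cases hlt : L.getD k 0 < L.getD (k+1) 0
      · simp only [pvM, pvUp, if_pos hlt, if_pos hpair]
      · simp only [pvM, pvUp, if_neg hlt, if_pos hpair, ihk]

lemma pv_m_desc (L : List Int) (p : Nat) :
    ∀ k, p ≤ k → (∀ t, p+1 ≤ t → t ≤ k → ¬ (L.getD (t-1) 0 < L.getD t 0)) →
      pvM L k = pvM L p + (k:Int) - (p:Int) := by
  intro k
  induction k with
  | zero => intro hk _; interval_cases p; simp
  | succ k ih =>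
    intro hk hp
    rcases Nat.eq_or_lt_of_le hk with rfl | h'
    · simp
    · have hpair := hp (k+1) (by omega) (le_refl _)
      have hc : ¬ (L.getD k 0 < L.getD (k+1) 0) := by simpa using hpair
      simp only [pvM, if_neg hc]
      rw [ih (by omega) (fun t ht1 ht2 => hp t ht1 (by omega))]
      push_cast; ring

lemma pv_m_le_best (L : List Int) : ∀ k, pvM L k ≤ pvBest L k := by
  intro k
  induction k with
  | zero => simp [pvM, pvBest]
  | succ k ih => simp only [pvBest]; exact le_max_right _ _

lemma pv_best_mono (L : List Int) : ∀ e e', e ≤ e' → pvBest L e ≤ pvBest L e' := by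
  intro e e' h
  induction e' with
  | zero => interval_cases e; simp
  | succ e' ih =>
    rcases Nat.eq_or_lt_of_le h with rfl | h'
    · simp
    · exact le_trans (ih (by omega)) (le_max_left _ _)

lemma pv_best_le (L : List Int) (e : Nat) (B : Int) :
    ∀ e', e ≤ e' → (∀ k, e < k → k ≤ e' → pvM L k ≤ B) → pvBest L e ≤ B →
      pvBest L e' ≤ B := by
  intro e'
  induction e' with
  | zero => intro h _ hB; interval_cases e; exact hB
  | succ e' ih =>
    intro h hk hB
    rcases Nat.eq_or_lt_of_le h with rfl | h'
    · exact hB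
    · simp only [pvBest, max_le_iff]
      exact ⟨ih (by omega) (fun k h1 h2 => hk k h1 (by omega)) hB,
             hk (e'+1) (by omega) (le_refl _)⟩

lemma pv_best_eq_max (L : List Int) (e e' : Nat) (h : e ≤ e')
    (hmono : ∀ k, e < k → k ≤ e' → pvM L k ≤ pvM L e') :
    pvBest L e' = max (pvBest L e) (pvM L e') := by
  apply le_antisymm
  · exact pv_best_le L e _ e' h
      (fun k h1 h2 => le_trans (hmono k h1 h2) (le_max_right _ _))
      (le_max_left _ _)
  · exact max_le (pv_best_mono L e e' h) (pv_m_le_best L e')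

-- ---- max? bookkeeping ----
lemma pv_max_append (acc : List Int) (M v : Int)
    (h : PySem.List.max? acc (fun x => x) = some M) :
    PySem.List.max? (acc ++ [v]) (fun x => x) = some (max M v) := by
  cases acc with
  | nil => simp [PySem.List.max?] at h
  | cons a t =>
    rw [PySem.List.max?_id_cons] at h
    have ht : t.foldl max a = M := by injection h
    rw [List.cons_append, PySem.List.max?_id_cons, List.foldl_append, ht]
    rfl

lemma pv_reset (L : List Int) (e : Nat) (h : L.getD e 0 < L.getD (e+1) 0) :
    pvM L (e+1) = pvUp L (e+1) := by
  simp only [pvM, pvUp, if_pos h, if_pos (le_of_lt h)]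

-- one round of A's outer loop, analysed against pvUp/pvM: the scanned segment
-- [s .. j-1] carries pvM k = k - s + 1 from the reset point E onwards
lemma pv_segment (L : List Int) (s i E : Nat)
    (hin : i < L.length) (hsi : s ≤ i) (hiE : i ≤ E) (hEn : E ≤ L.length - 1)
    (hclimb : ∀ t, s+1 ≤ t → t ≤ E → L.getD (t-1) 0 ≤ L.getD t 0)
    (hleft : s = 0 ∨ L.getD s 0 < L.getD (s-1) 0)
    (hmE : pvM L E = pvUp L E) :
    E + 1 ≤ unimodUp L (i+1) ∧
    unimodUp L (i+1) ≤ unimodDown L (unimodUp L (i+1)) ∧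
    unimodDown L (unimodUp L (i+1)) ≤ L.length ∧
    (∀ k, E ≤ k → k + 1 ≤ unimodDown L (unimodUp L (i+1)) →
        pvM L k = (k:Int) - (s:Int) + 1) ∧
    (unimodDown L (unimodUp L (i+1)) < L.length →
        L.getD (unimodDown L (unimodUp L (i+1)) - 1) 0 <
          L.getD (unimodDown L (unimodUp L (i+1))) 0) ∧
    (unimodUp L (i+1) < L.length →
        L.getD (unimodUp L (i+1)) 0 < L.getD (unimodUp L (i+1) - 1) 0) ∧
    (∀ k, unimodUp L (i+1) ≤ k → k < unimodDown L (unimodUp L (i+1)) →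
        L.getD k 0 ≤ L.getD (k-1) 0) := by
  set q := unimodUp L (i+1) with hqdef
  set j := unimodDown L q with hjdef
  have hq1 : i + 1 ≤ q := pv_le_unimodUp L (i+1)
  have hqle : q ≤ L.length := pv_unimodUp_le L (i+1) (by omega)
  have hqj : q ≤ j := pv_le_unimodDown L q
  have hjle : j ≤ L.length := pv_unimodDown_le L q hqle
  have hpairs : ∀ k, s+1 ≤ k → k < q → L.getD (k-1) 0 ≤ L.getD k 0 := by
    intro k h1 h2
    rcases Nat.lt_or_ge k (E+1) with h | h
    · exact hclimb k h1 (by omega)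
    · exact pv_up_pairs L (i+1) k (by omega) h2
  have hqE : E + 1 ≤ q := by
    by_contra h
    push Not at h
    have hql : q < L.length := by omega
    have h1 := pv_unimodUp_exit L (i+1) hql
    have h2 := hclimb q (by omega) (by omega)
    rw [← hqdef] at h1
    omega
  have hup : ∀ k, s ≤ k → k + 1 ≤ q → pvUp L k = (k:Int) - (s:Int) + 1 := by
    intro k h1 h2
    exact pv_up_run L s hleft k h1 (fun t ht1 ht2 => hpairs t ht1 (by omega))
  have hmup : ∀ k, E ≤ k → k + 1 ≤ q → pvM L k = (k:Int) - (s:Int) + 1 := by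
    intro k h1 h2
    rw [pv_m_eq_up L E hmE k h1 (fun t ht1 ht2 => hpairs t (by omega) (by omega))]
    exact hup k (by omega) h2
  have hdown : ∀ k, q ≤ k → k < j → L.getD k 0 ≤ L.getD (k-1) 0 := by
    intro k h1 h2
    exact pv_down_pairs L q k h1 h2
  refine ⟨hqE, hqj, hjle, ?_, ?_, ?_, hdown⟩
  · intro k hk1 hk2
    rcases Nat.lt_or_ge k q with h | h
    · exact hmup k hk1 h
    · have hdesc := pv_m_desc L (q-1) k (by omega)
        (fun t ht1 ht2 => by
          have := hdown t (by omega) (by omega)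
          omega)
      rw [hdesc, hmup (q-1) (by omega) (by omega)]
      omega
  · intro h
    have := pv_unimodDown_exit L q h
    rw [← hjdef] at this
    exact this
  · intro h
    have := pv_unimodUp_exit L (i+1) h
    rw [← hqdef] at this
    exact this

-- the outer loop, by strong induction on how much of the list is still uncovered
lemma pv_aloop (L : List Int) :
    ∀ d s i E acc, L.length - E = d →
      i < L.length → s ≤ i → i ≤ E → E ≤ L.length - 1 →
      (∀ t, s+1 ≤ t → t ≤ E → L.getD (t-1) 0 ≤ L.getD t 0) →
      (s = 0 ∨ L.getD s 0 < L.getD (s-1) 0) →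
      pvM L E = pvUp L E →
      ((PySem.List.max? acc (fun x => x) = some (pvBest L (E-1)) ∧ 1 ≤ E) ∨
        (acc = [] ∧ E = 0)) →
      PySem.List.max? (aloop L ((s:Nat):Int) i acc) (fun x => x) =
        some (pvBest L (L.length - 1)) := by
  intro d
  induction d using Nat.strong_induction_on with
  | _ d ih =>
  intro s i E acc hd hin hsi hiE hEn hclimb hleft hmE hacc
  obtain ⟨hqE, hqj, hjle, hc2, hc3, hc4, hc5⟩ :=
    pv_segment L s i E hin hsi hiE hEn hclimb hleft hmE
  rw [aloop, dif_pos hin]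
  simp only [unimodP]
  set q := unimodUp L (i+1) with hqdef
  set j := unimodDown L q with hjdef
  have hq1 : i + 1 ≤ q := pv_le_unimodUp L (i+1)
  have hij : i < j := by omega
  have hvlen : ((PySem.List.slice L (some ((s:Nat):Int)) (some ((j:Nat):Int))).length : Int)
      = (j:Int) - (s:Int) := by
    rw [PySem.List.slice_natCast]
    simp only [List.length_take, List.length_drop]
    omega
  have hmj : pvM L (j-1) = (j:Int) - (s:Int) := by
    have := hc2 (j-1) (by omega) (by omega)
    rw [this]; omega
  have hmono : ∀ k, E - 1 < k → k ≤ j - 1 → pvM L k ≤ pvM L (j-1) := by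
    intro k h1 h2
    have hk := hc2 k (by omega) (by omega)
    rw [hk, hmj]; omega
  have hnewmax : PySem.List.max? (acc ++ [((PySem.List.slice L (some ((s:Nat):Int)) (some ((j:Nat):Int))).length : Int)]) (fun x => x)
      = some (pvBest L (j-1)) := by
    rcases hacc with ⟨hm, hE1⟩ | ⟨rfl, hE0⟩
    · rw [pv_max_append acc _ _ hm, hvlen,
        pv_best_eq_max L (E-1) (j-1) (by omega) hmono, hmj]
    · have hs0 : s = 0 := by omega
      have hmax1 : PySem.List.max? ([] ++ [((PySem.List.slice L (some ((s:Nat):Int)) (some ((j:Nat):Int))).length : Int)]) (fun x => x)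
          = some (((PySem.List.slice L (some ((s:Nat):Int)) (some ((j:Nat):Int))).length : Int)) := by
        rw [List.nil_append, PySem.List.max?_id_cons]
        rfl
      rw [hmax1, hvlen]
      rw [pv_best_eq_max L (E-1) (j-1) (by omega) hmono, hmj]
      have h1j : (1:Int) ≤ (j:Int) - (s:Int) := by omega
      have hb1 : pvBest L (E-1) = 1 := by rw [hE0]; rfl
      rw [hb1, max_eq_right h1j]
  by_cases hjn : j = L.length
  · rw [if_pos hjn, aloop, dif_neg (by omega)]
    rw [hnewmax, hjn]
  · rw [if_neg hjn]
    have hjlt : j < L.length := by omega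
    have hrise := hc3 hjlt
    have hdropq : L.getD q 0 < L.getD (q-1) 0 := hc4 (by omega)
    have hqj1 : q + 1 ≤ j := by
      rw [hjdef, pv_unimodDown_step L q ⟨by omega, le_of_lt hdropq⟩]
      exact pv_le_unimodDown L (q+1)
    have hqr : q < ifRepeat L j := pv_plateau_bound L q j (by omega) (by omega) hdropq
    have hrj : ifRepeat L j ≤ j := pv_ifRepeat_le L j
    set r := ifRepeat L j with hrdef
    have hr2 : 2 ≤ r := by omega
    have hcast : (r:Int) - 1 = ((r - 1 : Nat):Int) := by omega
    rw [hcast]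
    apply ih (L.length - j) (by omega) (r-1) r j _ rfl (by omega) (by omega) (by omega) (by omega)
    · -- climb hypothesis for the next round: plateau then the strict rise at j
      intro t ht1 ht2
      have ht1' : r ≤ t := by omega
      rcases Nat.lt_or_ge t j with h | h
      · have := pv_plateau_adj L j t (by omega) (by omega) (by omega)
        omega
      · have htj : t = j := by omega
        subst htj
        omega
    · -- left boundary: strict drop into the plateau
      right
      have hstop := pv_ifRepeat_stop L j (by omega)
      rw [← hrdef] at hstop
      have e1 : ((r:Nat):Int) - 1 = ((r-1 : Nat) : Int) := by omega
      have e2 : ((r:Nat):Int) - 2 = ((r-2 : Nat) : Int) := by omega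
      rw [e1, e2, PySem.List.pyGetD_natCast, PySem.List.pyGetD_natCast] at hstop
      have hle := hc5 (r-1) (by omega) (by omega)
      have : r - 1 - 1 = r - 2 := by omega
      rw [this] at hle
      have : (r:Nat) - 1 - 1 = r - 2 := by omega
      rw [this]
      omega
    · -- reset: pvM = pvUp at the strict rise j
      obtain ⟨j', hj'⟩ : ∃ j', j = j' + 1 := ⟨j - 1, by omega⟩
      rw [hj']
      apply pv_reset
      rw [hj'] at hrise
      simpa using hrise
    · left
      exact ⟨hnewmax, by omega⟩

-- ===== VERDICT (by name: the statement is the Claim_ definition above) =====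
theorem maxunimod_spec : Claim_equal_maxunimod := by
  unfold Claim_equal_maxunimod
  intro L _
  unfold Spec_maxunimod
  by_cases hn : L.length ≤ 1
  · rw [maxunimod, if_pos hn, maxunimod_alt, if_pos hn]
  · have hn2 : 2 ≤ L.length := by omega
    rw [maxunimod, if_neg hn, pvB_char L hn2]
    have h := pv_aloop L L.length 0 0 0 [] (by omega) (by omega) (le_refl 0)
      (le_refl 0) (by omega) (by intro t h1 h2; omega) (Or.inl rfl) rfl
      (Or.inr ⟨rfl, rfl⟩)
    rw [show (((0:Nat):Int)) = (0:Int) from rfl] at h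
    rw [h, Option.getD_some]
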